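-- pv_equiv track=rewrite | github.com/ricpacca/cryptopals | S3C23.py | undo_left_shift_xor_and
-- ===== SOURCE A (Python) =====
-- def get_bit(number, position):
--     """Returns the bit at the given position of the given number. The position
--     is counted starting from the left in the binary representation (from the most
--     significant to the least significant bit).
--     """
--     if position < 0 or position > 31:
--         return 0
--     return (number >> (31 - position)) & 1
--
-- def set_bit_to_one(number, position):
--     """Sets the bit at the given position of the given number to 1.The position
--     is counted starting from the left in the binary representation (from the most
--     significant to the least significant bit).
--     """
--     return number | (1 << (31 - position))
--
-- def undo_left_shift_xor_and(result, shift_len, andd):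
--     """When the left shift, then XOR and then the AND are done, we can reverse the process
--     bit by bit by redoing the AND between the un-shifted resulting value and the and'd value
--     and then by XORing with the corresponding bit of the given result.
--     Sounds like magic, but try it on paper and you'll see that it works.
--     This time the process is doing starting from the right and each bit is AND'd with the bit
--     shift_len positions above.
--     """
--     original = 0
--     for i in range(32):
--         next_bit = get_bit(result, 31 - i) ^ \
--                    (get_bit(original, 31 - (i - shift_len)) &
--                     get_bit(andd, 31 - i))
--
--         if next_bit == 1:
--             original = set_bit_to_one(original, 31 - i)
--
--     return original
-- ===== SOURCE B (Python) =====
-- def undo_left_shift_xor_and(result, shift_len, andd):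
--     """Word-parallel untempering: iterate the whole-word fixed point
--     original = r ^ ((original << shift_len) & a) 32 times instead of
--     recovering one bit at a time.  Shifts outside the 32-bit word
--     (shift_len <= 0 or >= 32) leave the word unchanged."""
--     r = result & 0xFFFFFFFF
--     if not 0 < shift_len < 32:
--         return r
--     a = andd & 0xFFFFFFFF
--     original = 0
--     for _ in range(32):
--         original = r ^ ((original << shift_len) & a)
--     return original
-- ===== Notes on version B (the rewrite author's own statement) =====
-- stated objective: idiomatic
-- what changed: Replaces A's per-bit loop (read one bit of result/state/andd, maybe set one bit, 32 times via get_bit/set_bit_to_one) with the standard word-parallel MT19937 untempering: mask to 32 bits and iterate original = r ^ ((original << shift) & a) on whole words, returning r directly for shifts outside 1..31, which leave the word unchanged.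
import Mathlib
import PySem

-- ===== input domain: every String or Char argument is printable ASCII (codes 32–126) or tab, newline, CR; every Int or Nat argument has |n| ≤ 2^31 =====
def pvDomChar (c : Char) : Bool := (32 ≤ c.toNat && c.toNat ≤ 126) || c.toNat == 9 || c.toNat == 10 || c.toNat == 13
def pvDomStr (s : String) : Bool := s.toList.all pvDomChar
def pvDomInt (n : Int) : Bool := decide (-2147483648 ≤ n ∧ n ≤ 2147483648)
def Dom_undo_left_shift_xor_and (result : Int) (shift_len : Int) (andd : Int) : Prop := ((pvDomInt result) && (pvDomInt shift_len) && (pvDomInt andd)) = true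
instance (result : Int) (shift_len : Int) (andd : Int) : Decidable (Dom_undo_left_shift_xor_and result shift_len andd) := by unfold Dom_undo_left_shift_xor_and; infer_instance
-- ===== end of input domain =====

-- B replaces A's per-bit scan (read one bit, maybe set one bit, 32 times) by the standard
-- word-parallel untempering fixed-point iteration on whole 32-bit words.

-- ===== PORT A =====
-- A-side helper: get_bit (the shift amount 31 - position is in [0, 31] in the taken branch, so .toNat is exact)
def pyGetBit (number : Int) (position : Int) : Int :=
  if position < 0 ∨ position > 31 then 0
  else PySem.Int.band (number >>> (31 - position).toNat) 1

-- A-side helper: set_bit_to_one (A only calls it with position ∈ [0, 31], where 31 - position ≥ 0, so .toNat is exact)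
def pySetBitToOne (number : Int) (position : Int) : Int :=
  PySem.Int.bor number ((1 : Int) <<< (31 - position).toNat)

def undo_left_shift_xor_and (result : Int) (shift_len : Int) (andd : Int) : Int :=
  (PySem.List.pyRange 0 32 1).foldl
    (fun original i =>
      let next_bit := PySem.Int.bxor (pyGetBit result (31 - i))
        (PySem.Int.band (pyGetBit original (31 - (i - shift_len))) (pyGetBit andd (31 - i)))
      if next_bit = 1 then pySetBitToOne original (31 - i) else original)
    0

-- ===== PORT B =====
-- transliteration of Source B: mask to 32 bits, shifts outside 1..31 leave the word unchanged,
-- otherwise iterate the whole-word fixed point 32 times (shift_len > 0 in the loop, so .toNat is exact)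
def undo_left_shift_xor_and_alt (result : Int) (shift_len : Int) (andd : Int) : Int :=
  let r := PySem.Int.band result 4294967295
  if ¬ (0 < shift_len ∧ shift_len < 32) then r
  else
    let a := PySem.Int.band andd 4294967295
    (List.range 32).foldl
      (fun original _ => PySem.Int.bxor r (PySem.Int.band (original <<< shift_len.toNat) a)) 0

-- ===== PRECONDITION & SPEC =====
def Spec_undo_left_shift_xor_and (result : Int) (shift_len : Int) (andd : Int) (out : Int) : Prop := out = undo_left_shift_xor_and_alt result shift_len andd
instance (result : Int) (shift_len : Int) (andd : Int) (out : Int) : Decidable (Spec_undo_left_shift_xor_and result shift_len andd out) := by unfold Spec_undo_left_shift_xor_and; infer_instance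

-- ===== CLAIM (what is proved, stated in full; the proofs are below) =====
def Claim_equal_undo_left_shift_xor_and : Prop := ∀ (result : Int) (shift_len : Int) (andd : Int), Dom_undo_left_shift_xor_and result shift_len andd → Spec_undo_left_shift_xor_and result shift_len andd (undo_left_shift_xor_and result shift_len andd)

-- ===== LEMMAS AND PROOFS =====

-- the low 32 bits of an integer, as a natural number (Python's x & 0xFFFFFFFF)
def toW (x : Int) : Nat := (x % 4294967296).toNat

-- one step of B's word-parallel iteration, at the Nat level
def gN (rN aN s : Nat) (o : Nat) : Nat := rN ^^^ ((o <<< s) &&& aN)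

-- A's loop body, named so the fold can be reasoned about
def astep (result shift_len andd : Int) (original : Int) (i : Int) : Int :=
  let next_bit := PySem.Int.bxor (pyGetBit result (31 - i))
    (PySem.Int.band (pyGetBit original (31 - (i - shift_len))) (pyGetBit andd (31 - i)))
  if next_bit = 1 then pySetBitToOne original (31 - i) else original

lemma tb_div (m k : Nat) : Nat.testBit m k = decide (m / 2 ^ k % 2 = 1) := by
  simp only [Nat.testBit, Nat.one_and_eq_mod_two, Nat.shiftRight_eq_div_pow]
  by_cases h : m / 2 ^ k % 2 = 1
  · simp [h]
  · have h0 : m / 2 ^ k % 2 = 0 := by omega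
    simp [h0]

lemma one_shl_tb (j k : Nat) : (1 <<< k : Nat).testBit j = decide (j = k) := by
  rw [Nat.shiftLeft_eq, one_mul]
  by_cases h : j = k
  · subst h; simp [Nat.testBit_two_pow_self]
  · simp [h, Nat.testBit_two_pow_of_ne (Ne.symm h)]

lemma toW_lt (x : Int) : toW x < 4294967296 := by unfold toW; omega

lemma toW_natCast (O : Nat) (h : O < 4294967296) : toW (O : Int) = O := by unfold toW; omega

lemma band_mask (x : Int) : PySem.Int.band x 4294967295 = ((toW x : Nat) : Int) := by
  unfold PySem.Int.band toW
  have hm : (4294967295 : Int).toNat = 2 ^ 32 - 1 := rfl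
  split_ifs with h1 h2 h2
  · rw [hm, Nat.and_two_pow_sub_one_eq_mod]; omega
  · norm_num at h2
  · rw [hm, Nat.and_comm, Nat.and_two_pow_sub_one_eq_mod]; omega
  · norm_num at h2

lemma shr_mod_two (x : Int) (k : Nat) (hk : k < 32) :
    (x >>> k) % 2 = if (toW x).testBit k then 1 else 0 := by
  rw [Int.shiftRight_eq_div_pow,
    show ((2 ^ k : Nat) : Int) = (2 : Int) ^ k by push_cast; ring]
  have h2 : ((toW x : Nat) : Int) = x % 4294967296 := by unfold toW; omega
  have hp : ((2 : Int) ^ (32 - k)) * 2 ^ k = 4294967296 := by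
    rw [← pow_add]
    have h : 32 - k + k = 32 := by omega
    rw [h]; norm_num
  have e : 4294967296 * (x / 4294967296) + x % 4294967296 = x := Int.mul_ediv_add_emod x 4294967296
  have key : ((toW x : Nat) : Int) + (2 ^ (32 - k) * (x / 4294967296)) * 2 ^ k = x := by
    rw [h2]; linear_combination e + (x / 4294967296) * hp
  conv_lhs => rw [← key]
  rw [Int.add_mul_ediv_right _ _ (by positivity : (2 : Int) ^ k ≠ 0)]
  have h2' : (2 : Int) ^ (32 - k) = 2 * 2 ^ (31 - k) := by
    have h : 32 - k = (31 - k) + 1 := by omega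
    rw [h, pow_succ']
  rw [h2', mul_assoc, Int.add_mul_emod_self_left]
  have hc : ((2 : Int) ^ k) = ((2 ^ k : Nat) : Int) := by push_cast; ring
  rw [hc, ← Int.natCast_div, tb_div]
  generalize toW x / 2 ^ k = m
  rcases Nat.mod_two_eq_zero_or_one m with h | h <;> simp [h] <;> omega

lemma getbit_eq (x : Int) (k : Nat) (hk : k < 32) :
    pyGetBit x (31 - (k : Int)) = if (toW x).testBit k then 1 else 0 := by
  unfold pyGetBit
  rw [if_neg (by omega)]
  have h1 : ((31 : Int) - (31 - (k : Int))).toNat = k := by omega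
  rw [h1, PySem.Int.band_one]
  have hmod : PySem.Int.mod (x >>> k) 2 = (x >>> k) % 2 := by
    unfold PySem.Int.mod
    rw [Int.fmod_eq_emod]
    norm_num
  rw [hmod, shr_mod_two x k hk]

lemma bi_arith (p q r : Bool) :
    PySem.Int.bxor (if p then 1 else 0) (PySem.Int.band (if q then 1 else 0) (if r then 1 else 0))
      = if (p ^^ (q && r)) then 1 else 0 := by
  cases p <;> cases q <;> cases r <;> decide

lemma gbit (rN aN s o j : Nat) :
    (gN rN aN s o).testBit j
      = (rN.testBit j ^^ ((decide (s ≤ j) && o.testBit (j - s)) && aN.testBit j)) := by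
  simp [gN, Nat.testBit_xor, Nat.testBit_and, Nat.testBit_shiftLeft, ge_iff_le]

lemma g_indep (rN aN s : Nat) (hs : 1 ≤ s) :
    ∀ (k : Nat) (x y j : Nat), j < k →
      ((gN rN aN s)^[k] x).testBit j = ((gN rN aN s)^[k] y).testBit j := by
  intro k
  induction k with
  | zero => intro x y j hj; omega
  | succ k ih =>
    intro x y j hj
    rw [Function.iterate_succ_apply', Function.iterate_succ_apply', gbit, gbit]
    by_cases h : s ≤ j
    · have : j - s < k := by omega
      rw [ih x y (j - s) this]
    · simp [h]

lemma gN_lt (rN aN s o : Nat) (hr : rN < 4294967296) (ha : aN < 4294967296) :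
    gN rN aN s o < 4294967296 := by
  have h1 : (o <<< s) &&& aN < 4294967296 := lt_of_le_of_lt Nat.and_le_right ha
  have := Nat.xor_lt_two_pow (n := 32) (by norm_num at hr ⊢; exact hr) (by norm_num at h1 ⊢; exact h1)
  norm_num at this ⊢
  exact this

lemma iter_lt (rN aN s k : Nat) (hr : rN < 4294967296) (ha : aN < 4294967296) (hk : 1 ≤ k) :
    (gN rN aN s)^[k] 0 < 4294967296 := by
  obtain ⟨k', rfl⟩ : ∃ k', k = k' + 1 := ⟨k - 1, by omega⟩
  rw [Function.iterate_succ_apply']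
  exact gN_lt _ _ _ _ hr ha

lemma range_eq : PySem.List.pyRange 0 32 1 = List.map (fun n : Nat => Int.ofNat n) (List.range 32) := by decide

lemma unfoldA (result shift_len andd : Int) :
    undo_left_shift_xor_and result shift_len andd
      = (List.range 32).foldl (fun o (n : Nat) => astep result shift_len andd o (Int.ofNat n)) 0 := by
  unfold undo_left_shift_xor_and astep
  rw [range_eq, List.foldl_map]

lemma setbit_eq (O : Nat) (k : Nat) (hk : k < 32) :
    pySetBitToOne (O : Int) (31 - (k : Int)) = ((O ||| 1 <<< k : Nat) : Int) := by
  unfold pySetBitToOne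
  have h1 : ((31 : Int) - (31 - (k : Int))).toNat = k := by omega
  rw [h1]
  have h2 : ((1 : Int) <<< k) = (((1 <<< k : Nat) : Nat) : Int) := by
    rw [Int.natCast_shiftLeft]; norm_num
  rw [h2, PySem.Int.bor_natCast]

lemma setbit_bits (O k : Nat) (b : Bool) (hO : O < 2 ^ k) (j : Nat) :
    (if b then O ||| 1 <<< k else O).testBit j = if j = k then b else O.testBit j := by
  cases b
  · by_cases h : j = k
    · subst h; simp [Nat.testBit_lt_two_pow hO]
    · simp [h]
  · simp only [if_true]
    rw [Nat.testBit_or, one_shl_tb]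
    by_cases h : j = k <;> simp [h]

lemma getbit_mid (O : Nat) (s : Int) (k : Nat) (hO : O < 4294967296)
    (hs1 : 1 ≤ s) (hs2 : s < 32) (hk : k < 32) :
    pyGetBit (O : Int) (31 - ((k : Int) - s))
      = if (decide (s.toNat ≤ k) && O.testBit (k - s.toNat)) then 1 else 0 := by
  by_cases h : s ≤ (k : Int)
  · have harg : (31 : Int) - ((k : Int) - s) = 31 - ((k - s.toNat : Nat) : Int) := by omega
    rw [harg, getbit_eq _ _ (by omega), toW_natCast O hO]
    have hd : decide (s.toNat ≤ k) = true := by simp; omega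
    rw [hd]; simp
  · have harg : (31 : Int) - ((k : Int) - s) > 31 := by omega
    unfold pyGetBit
    rw [if_pos (Or.inr harg)]
    have hd : decide (s.toNat ≤ k) = false := by simp; omega
    rw [hd]; simp

lemma step_if (b : Bool) (x y : Int) :
    (if (if b then (1 : Int) else 0) = 1 then x else y) = (if b then x else y) := by
  cases b <;> norm_num

-- main invariant, middle shifts: A's state after k steps is B's k-th iterate mod 2^k
lemma A_inv (result s andd : Int) (hs1 : 1 ≤ s) (hs2 : s < 32) :
    ∀ k, k ≤ 32 →
      (List.range k).foldl (fun o (n : Nat) => astep result s andd o (Int.ofNat n)) 0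
        = ((((gN (toW result) (toW andd) s.toNat)^[k] 0 % 2 ^ k : Nat)) : Int) := by
  intro k
  induction k with
  | zero => intro _; simp
  | succ k ih =>
    intro hk
    rw [List.range_succ, List.foldl_append, List.foldl_cons, List.foldl_nil, ih (by omega)]
    have hk32 : k < 32 := by omega
    have hpow : (2 : Nat) ^ k ≤ 4294967296 := by
      calc (2 : Nat) ^ k ≤ 2 ^ 32 := Nat.pow_le_pow_right (by norm_num) (by omega)
        _ = 4294967296 := by norm_num
    have hOk : (gN (toW result) (toW andd) s.toNat)^[k] 0 % 2 ^ k < 2 ^ k :=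
      Nat.mod_lt _ (by positivity)
    have hO32 : (gN (toW result) (toW andd) s.toNat)^[k] 0 % 2 ^ k < 4294967296 :=
      lt_of_lt_of_le hOk hpow
    unfold astep
    simp only [Int.ofNat_eq_natCast]
    rw [getbit_eq result k hk32, getbit_eq andd k hk32,
      getbit_mid _ s k hO32 hs1 hs2 hk32, bi_arith, step_if]
    have key :
        (if ((toW result).testBit k ^^
              ((decide (s.toNat ≤ k) &&
                  ((gN (toW result) (toW andd) s.toNat)^[k] 0 % 2 ^ k).testBit (k - s.toNat)) &&
                (toW andd).testBit k))
          then (gN (toW result) (toW andd) s.toNat)^[k] 0 % 2 ^ k ||| 1 <<< k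
          else (gN (toW result) (toW andd) s.toNat)^[k] 0 % 2 ^ k)
          = (gN (toW result) (toW andd) s.toNat)^[k + 1] 0 % 2 ^ (k + 1) := by
      apply Nat.eq_of_testBit_eq
      intro j
      rw [setbit_bits _ _ _ hOk j]
      simp only [Nat.testBit_mod_two_pow]
      by_cases hjk : j = k
      · subst hjk
        rw [if_pos rfl, Function.iterate_succ_apply', gbit]
        have hsN : 1 ≤ s.toNat := by omega
        by_cases hsk : s.toNat ≤ j
        · have hlt : j - s.toNat < j := by omega
          simp [hsk, hlt]
        · simp [hsk]
      · rw [if_neg hjk]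
        rcases Nat.lt_or_ge j k with hj | hj
        · have hstab : ((gN (toW result) (toW andd) s.toNat)^[k + 1] 0).testBit j
              = ((gN (toW result) (toW andd) s.toNat)^[k] 0).testBit j := by
            rw [Function.iterate_succ_apply]
            exact g_indep _ _ _ (by omega) k _ 0 j hj
          simp only [hj, show j < k + 1 by omega, decide_true, Bool.true_and]
          exact hstab.symm
        · have hj' : ¬ j < k := by omega
          have hj'' : ¬ j < k + 1 := by omega
          simp [hj', hj'']
    by_cases hx : ((toW result).testBit k ^^
        ((decide (s.toNat ≤ k) &&
            ((gN (toW result) (toW andd) s.toNat)^[k] 0 % 2 ^ k).testBit (k - s.toNat)) &&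
          (toW andd).testBit k)) = true
    · rw [if_pos hx] at key
      rw [if_pos hx, setbit_eq _ k hk32]
      exact_mod_cast key
    · rw [if_neg hx] at key
      rw [if_neg hx]
      exact_mod_cast key

-- invariant for degenerate shifts: the and-term is always 0 and A just copies result's bits
lemma A_inv0 (result s andd : Int) (hs : s ≤ 0 ∨ 32 ≤ s) :
    ∀ k, k ≤ 32 →
      (List.range k).foldl (fun o (n : Nat) => astep result s andd o (Int.ofNat n)) 0
        = (((toW result % 2 ^ k : Nat)) : Int) := by
  intro k
  induction k with
  | zero => intro _; simp
  | succ k ih =>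
    intro hk
    rw [List.range_succ, List.foldl_append, List.foldl_cons, List.foldl_nil, ih (by omega)]
    have hk32 : k < 32 := by omega
    have hpow : (2 : Nat) ^ k ≤ 4294967296 := by
      calc (2 : Nat) ^ k ≤ 2 ^ 32 := Nat.pow_le_pow_right (by norm_num) (by omega)
        _ = 4294967296 := by norm_num
    have hOk : toW result % 2 ^ k < 2 ^ k := Nat.mod_lt _ (by positivity)
    have hO32 : toW result % 2 ^ k < 4294967296 := lt_of_lt_of_le hOk hpow
    have hmid : pyGetBit ((toW result % 2 ^ k : Nat) : Int) (31 - ((k : Int) - s)) = 0 := by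
      rcases hs with hs | hs
      · by_cases hneg : (31 : Int) - ((k : Int) - s) < 0
        · unfold pyGetBit
          rw [if_pos (Or.inl hneg)]
        · have hm31 : ((k : Int) - s).toNat ≤ 31 := by omega
          have hkm : k ≤ ((k : Int) - s).toNat := by omega
          rw [show (31 : Int) - ((k : Int) - s) = 31 - ((((k : Int) - s).toNat : Nat) : Int) by omega,
            getbit_eq _ _ (by omega), toW_natCast _ hO32]
          have hbit : (toW result % 2 ^ k).testBit (((k : Int) - s).toNat) = false :=
            Nat.testBit_lt_two_pow
              (lt_of_lt_of_le hOk (Nat.pow_le_pow_right (by norm_num) hkm))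
          simp [hbit]
      · unfold pyGetBit
        rw [if_pos (Or.inr (by omega))]
    unfold astep
    simp only [Int.ofNat_eq_natCast]
    rw [getbit_eq result k hk32, getbit_eq andd k hk32, hmid,
      PySem.Int.band_comm, PySem.Int.band_zero, PySem.Int.bxor_zero, step_if]
    have key :
        (if (toW result).testBit k
          then toW result % 2 ^ k ||| 1 <<< k
          else toW result % 2 ^ k) = toW result % 2 ^ (k + 1) := by
      apply Nat.eq_of_testBit_eq
      intro j
      rw [setbit_bits _ _ _ hOk j]
      simp only [Nat.testBit_mod_two_pow]
      by_cases hjk : j = k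
      · subst hjk; simp
      · rw [if_neg hjk]
        rcases Nat.lt_or_ge j k with hj | hj
        · simp [hj, show j < k + 1 by omega]
        · have hj' : ¬ j < k := by omega
          have hj'' : ¬ j < k + 1 := by omega
          simp [hj', hj'']
    by_cases hx : (toW result).testBit k = true
    · rw [if_pos hx] at key
      rw [if_pos hx, setbit_eq _ k hk32]
      exact_mod_cast key
    · rw [if_neg hx] at key
      rw [if_neg hx]
      exact_mod_cast key

lemma B_fold (rN aN : Nat) (sN : Nat) :
    ∀ k, (List.range k).foldl
        (fun o (_ : Nat) => PySem.Int.bxor ((rN : Nat) : Int) (PySem.Int.band (o <<< sN) ((aN : Nat) : Int))) 0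
      = (((gN rN aN sN)^[k] 0 : Nat) : Int) := by
  intro k
  induction k with
  | zero => simp
  | succ k ih =>
    rw [List.range_succ, List.foldl_append, List.foldl_cons, List.foldl_nil, ih,
      Function.iterate_succ_apply']
    rw [show ((((gN rN aN sN)^[k] 0 : Nat) : Int) <<< sN) = ((((gN rN aN sN)^[k] 0 <<< sN : Nat)) : Int) from (Int.natCast_shiftLeft _ _).symm,
      PySem.Int.band_natCast, PySem.Int.bxor_natCast]
    rfl

-- ===== VERDICT (by name: the statement is the Claim_ definition above) =====
theorem undo_left_shift_xor_and_spec : Claim_equal_undo_left_shift_xor_and := by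
  intro result shift_len andd _
  unfold Spec_undo_left_shift_xor_and undo_left_shift_xor_and_alt
  rw [unfoldA, band_mask, band_mask]
  by_cases hs : 0 < shift_len ∧ shift_len < 32
  · rw [if_neg (by simpa using hs)]
    rw [A_inv result shift_len andd (by omega) (by omega) 32 (le_refl _)]
    rw [B_fold (toW result) (toW andd) shift_len.toNat 32]
    have hlt : (gN (toW result) (toW andd) shift_len.toNat)^[32] 0 < 4294967296 :=
      iter_lt _ _ _ _ (toW_lt result) (toW_lt andd) (by omega)
    congr 1
    have : (2 : Nat) ^ 32 = 4294967296 := by norm_num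
    rw [this]
    exact Nat.mod_eq_of_lt hlt
  · rw [if_pos (by simpa using hs)]
    rw [A_inv0 result shift_len andd (by omega) 32 (le_refl _)]
    congr 1
    have : (2 : Nat) ^ 32 = 4294967296 := by norm_num
    rw [this]
    exact Nat.mod_eq_of_lt (toW_lt result)
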